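-- pv_equiv track=rewrite | github.com/0xConnorRhodes/notes-scripts | new-task.py | clean_render
-- ===== SOURCE A (Python) =====
-- def clean_render(content):
--     new_content = content
--     lines = content.splitlines()
--     if lines[0] == '':
--         lines = lines[1:]
--     dash_count = 0
--     new_lines = []
--     for line in lines:
--         if dash_count > 0 and dash_count < 2:
--             if line.strip() == '':
--                 continue
--         if line.strip() == '---':
--             dash_count += 1
--
--         new_lines.append(line)
--     new_content = '\n'.join(new_lines)
--     return new_content
-- ===== SOURCE B (Python) =====
-- def clean_render(content):
--     lines = content.splitlines()
--     if lines[0] == '':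
--         lines = lines[1:]
--     delims = [i for i, l in enumerate(lines) if l.strip() == '---']
--     if not delims:
--         return '\n'.join(lines)
--     start = delims[0] + 1
--     end = delims[1] if len(delims) > 1 else len(lines)
--     kept = lines[:start] + [l for l in lines[start:end] if l.strip() != ''] + lines[end:]
--     return '\n'.join(kept)
-- ===== Notes on version B (the rewrite author's own statement) =====
-- stated objective: alternative
-- what changed: Replaces A's stateful line-by-line scan with a dash counter by first locating the frontmatter delimiter indices, then slicing the lines into before/inside/after segments and filtering blanks only inside the frontmatter slice.
-- outside the precondition, e.g. on clean_render(''): A raises IndexError, B raises IndexError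
import Mathlib
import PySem

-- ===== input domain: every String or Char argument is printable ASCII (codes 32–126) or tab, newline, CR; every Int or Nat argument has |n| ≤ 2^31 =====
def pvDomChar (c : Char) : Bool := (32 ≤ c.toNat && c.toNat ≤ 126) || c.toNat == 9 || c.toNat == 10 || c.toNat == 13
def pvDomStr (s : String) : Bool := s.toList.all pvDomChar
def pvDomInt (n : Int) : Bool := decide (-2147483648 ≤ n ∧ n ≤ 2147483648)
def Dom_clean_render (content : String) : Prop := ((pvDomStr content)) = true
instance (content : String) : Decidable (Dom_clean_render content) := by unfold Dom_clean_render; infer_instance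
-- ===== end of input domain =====

-- B locates the frontmatter delimiter indices first, then filters blanks only in that slice;
-- same return value as A everywhere A returns (alternative decomposition, not faster).

-- ===== PORT A =====
-- A's loop: dash counter + accumulator; skip blank lines while exactly one '---' seen.
def pvStepA (st : Int × List String) (line : String) : Int × List String :=
  if 0 < st.1 ∧ st.1 < 2 ∧ PySem.Str.strip line = "" then st
  else
    ((if PySem.Str.strip line = "---" then st.1 + 1 else st.1), st.2 ++ [line])

def clean_render (content : String) : String :=
  let lines := PySem.Str.splitlines content
  match PySem.List.pyGet? lines 0 with
  | none => ""   -- Python raises IndexError here; excluded by Pre_clean_render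
  | some l0 =>
    let lines := if l0 = "" then PySem.List.slice lines (some 1) none else lines
    (lines.foldl pvStepA (0, [])).2 |> PySem.Str.join "\n"

-- ===== PORT B =====
def clean_render_alt (content : String) : String :=
  let lines := PySem.Str.splitlines content
  match PySem.List.pyGet? lines 0 with
  | none => ""   -- Python raises IndexError here; excluded by Pre_clean_render
  | some l0 =>
    let lines := if l0 = "" then PySem.List.slice lines (some 1) none else lines
    let delims := ((PySem.List.enumerate lines 0).filter
        (fun p => PySem.Str.strip p.2 == "---")).map (·.1)
    match delims with
    | [] => PySem.Str.join "\n" lines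
    | d0 :: rest =>
      let start := d0 + 1
      let stop : Int := match rest with | d1 :: _ => d1 | [] => (lines.length : Int)
      let kept := PySem.List.slice lines none (some start)
          ++ (PySem.List.slice lines (some start) (some stop)).filter
              (fun l => PySem.Str.strip l != "")
          ++ PySem.List.slice lines (some stop) none
      PySem.Str.join "\n" kept

-- ===== PRECONDITION & SPEC =====
-- Pre_ excludes only content = "" (splitlines gives [] and A's lines[0] raises IndexError; B raises too).
def Pre_clean_render (content : String) : Prop := content ≠ ""
instance (content : String) : Decidable (Pre_clean_render content) := by unfold Pre_clean_render; infer_instance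

def pvWitness_clean_render : String := "---\ntitle: x\n\n---\nbody"

def Spec_clean_render (content : String) (out : String) : Prop := out = clean_render_alt content
instance (content : String) (out : String) : Decidable (Spec_clean_render content out) := by unfold Spec_clean_render; infer_instance

-- ===== CLAIM (what is proved, stated in full; the proofs are below) =====
def Claim_equal_clean_render : Prop := ∀ (content : String), Dom_clean_render content → Pre_clean_render content → Spec_clean_render content (clean_render content)

-- ===== LEMMAS AND PROOFS =====

-- delimiter-index list of B, as a structural recursion (for induction)
def pvDelims : List String → Int → List Int
  | [], _ => []
  | x :: xs, s => if PySem.Str.strip x = "---" then s :: pvDelims xs (s + 1)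
                  else pvDelims xs (s + 1)

theorem pvDelims_eq (xs : List String) (s : Int) :
    ((PySem.List.enumerate xs s).filter (fun p => PySem.Str.strip p.2 == "---")).map (·.1)
      = pvDelims xs s := by
  induction xs generalizing s with
  | nil => simp [pvDelims, PySem.List.enumerate_nil]
  | cons x xs ih =>
    simp only [PySem.List.enumerate_cons, List.filter_cons, pvDelims]
    by_cases h : PySem.Str.strip x = "---" <;> simp [h, ih]

theorem pvDelims_nil_iff (xs : List String) (s : Int) :
    pvDelims xs s = [] ↔ ∀ l ∈ xs, ¬ PySem.Str.strip l = "---" := by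
  induction xs generalizing s with
  | nil => simp [pvDelims]
  | cons x xs ih =>
    simp only [pvDelims]
    by_cases h : PySem.Str.strip x = "---" <;> simp [h, ih]

theorem pvDelims_cons (xs : List String) (s d : Int) (rest : List Int)
    (h : pvDelims xs s = d :: rest) :
    ∃ u y ys, xs = u ++ y :: ys ∧ (∀ l ∈ u, ¬ PySem.Str.strip l = "---") ∧
      PySem.Str.strip y = "---" ∧ d = s + u.length ∧ pvDelims ys (d + 1) = rest := by
  induction xs generalizing s with
  | nil => simp [pvDelims] at h
  | cons x xs ih =>
    by_cases hx : PySem.Str.strip x = "---"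
    · simp only [pvDelims, hx, if_pos] at h
      injection h with hd hr
      subst hd
      exact ⟨[], x, xs, rfl, by simp, hx, by simp, hr⟩
    · simp only [pvDelims, hx, if_neg, not_false_iff] at h
      obtain ⟨u, y, ys, hxs, hu, hy, hd, hr⟩ := ih (s + 1) h
      refine ⟨x :: u, y, ys, by rw [hxs]; rfl, ?_, hy,
        by rw [hd, List.length_cons]; push_cast; ring, hr⟩
      intro l hl
      rcases List.mem_cons.mp hl with rfl | hl
      · exact hx
      · exact hu l hl

-- A's fold over a delimiter-free segment with counter 0: appends everything
theorem pvFold0 (xs : List String) (acc : List String)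
    (h : ∀ l ∈ xs, ¬ PySem.Str.strip l = "---") :
    xs.foldl pvStepA (0, acc) = (0, acc ++ xs) := by
  induction xs generalizing acc with
  | nil => simp
  | cons x xs ih =>
    have hx := h x (by simp)
    simp only [List.foldl_cons, pvStepA]
    rw [if_neg (by simp), if_neg hx]
    rw [ih (acc ++ [x]) (fun l hl => h l (by simp [hl]))]
    simp

-- A's fold over a delimiter-free segment with counter 1: appends the non-blank lines
theorem pvFold1 (xs : List String) (acc : List String)
    (h : ∀ l ∈ xs, ¬ PySem.Str.strip l = "---") :
    xs.foldl pvStepA (1, acc) = (1, acc ++ xs.filter (fun l => PySem.Str.strip l != "")) := by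
  induction xs generalizing acc with
  | nil => simp
  | cons x xs ih =>
    have hx := h x (by simp)
    simp only [List.foldl_cons, pvStepA, List.filter_cons]
    by_cases hb : PySem.Str.strip x = ""
    · rw [if_pos (by exact ⟨by norm_num, by norm_num, hb⟩)]
      rw [ih acc (fun l hl => h l (by simp [hl]))]
      simp [hb]
    · rw [if_neg (by simp [hb]), if_neg hx]
      rw [ih (acc ++ [x]) (fun l hl => h l (by simp [hl]))]
      simp [hb]

-- A's fold with counter ≥ 2: appends everything
theorem pvFold2 (xs : List String) (d : Int) (acc : List String) (hd : 2 ≤ d) :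
    (xs.foldl pvStepA (d, acc)).2 = acc ++ xs := by
  induction xs generalizing d acc with
  | nil => simp
  | cons x xs ih =>
    simp only [List.foldl_cons, pvStepA]
    rw [if_neg (by rintro ⟨_, h2, _⟩; omega)]
    by_cases hx : PySem.Str.strip x = "---"
    · rw [if_pos hx, ih (d + 1) _ (by omega)]; simp
    · rw [if_neg hx, ih d _ hd]; simp

-- the core equality, on the (already trimmed) line list
theorem pvCore (lines : List String) :
    (lines.foldl pvStepA (0, [])).2 =
      match pvDelims lines 0 with
      | [] => lines
      | d0 :: rest =>
        PySem.List.slice lines none (some (d0 + 1))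
          ++ (PySem.List.slice lines (some (d0 + 1))
                (some (match rest with | d1 :: _ => d1 | [] => (lines.length : Int)))).filter
              (fun l => PySem.Str.strip l != "")
          ++ PySem.List.slice lines
              (some (match rest with | d1 :: _ => d1 | [] => (lines.length : Int))) none := by
  cases hD : pvDelims lines 0 with
  | nil =>
    have := (pvDelims_nil_iff lines 0).1 hD
    rw [pvFold0 lines [] this]; simp
  | cons d0 rest =>
    obtain ⟨u, y, ys, hxs, hu, hy, hd0, hr⟩ := pvDelims_cons lines 0 d0 rest hD
    have hd0' : d0 = (u.length : Int) := by omega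
    subst hxs
    -- A side up to and including the first delimiter
    have hA1 : ((u ++ y :: ys).foldl pvStepA (0, [])) = (ys.foldl pvStepA (1, u ++ [y])) := by
      rw [List.foldl_append, pvFold0 u [] hu]
      simp only [List.nil_append, List.foldl_cons, pvStepA]
      rw [if_neg (by rintro ⟨h1, _, _⟩; omega), if_pos hy]
      norm_num
    -- B-side slice of the prefix
    have hTake : PySem.List.slice (u ++ y :: ys) none (some (d0 + 1)) = u ++ [y] := by
      rw [hd0', show ((u.length : Int) + 1) = ((u.length + 1 : Nat) : Int) by push_cast; ring,
        PySem.List.slice_to_natCast]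
      rw [List.take_length_add_append]
      simp
    cases hrest : rest with
    | nil =>
      rw [hrest] at hr
      have hys := (pvDelims_nil_iff ys (d0 + 1)).1 hr
      rw [hA1, pvFold1 ys (u ++ [y]) hys]
      simp only
      rw [hTake]
      have hMid : PySem.List.slice (u ++ y :: ys) (some (d0 + 1))
          (some (((u ++ y :: ys).length : Int))) = ys := by
        rw [hd0', show ((u.length : Int) + 1) = ((u.length + 1 : Nat) : Int) by push_cast; ring,
          show (((u ++ y :: ys).length : Int)) = (((u ++ y :: ys).length : Nat) : Int) by simp,
          PySem.List.slice_natCast]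
        rw [List.drop_length_add_append]
        simp
        omega
      have hPost : PySem.List.slice (u ++ y :: ys) (some (((u ++ y :: ys).length : Int))) none
          = [] := by
        rw [show (((u ++ y :: ys).length : Int)) = (((u ++ y :: ys).length : Nat) : Int) by simp,
          PySem.List.slice_from_natCast]
        simp
      rw [hMid, hPost]
      simp
    | cons d1 rest2 =>
      rw [hrest] at hr
      obtain ⟨u2, y2, ys2, hys, hu2, hy2, hd1, hr2⟩ := pvDelims_cons ys (d0 + 1) d1 rest2 hr
      have hd1' : d1 = ((u.length + 1 + u2.length : Nat) : Int) := by push_cast; omega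
      subst hys
      rw [hA1, List.foldl_append, pvFold1 u2 (u ++ [y]) hu2]
      simp only [List.foldl_cons, pvStepA]
      rw [if_neg (by rintro ⟨_, _, hb⟩; rw [hy2] at hb; exact absurd hb (by decide)),
        if_pos hy2]
      rw [pvFold2 ys2 (1 + 1) _ (by norm_num)]
      rw [hTake]
      have hMid : PySem.List.slice (u ++ y :: (u2 ++ y2 :: ys2)) (some (d0 + 1)) (some d1)
          = u2 := by
        rw [hd0', show ((u.length : Int) + 1) = ((u.length + 1 : Nat) : Int) by push_cast; ring,
          hd1', PySem.List.slice_natCast]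
        have hdrop : (u ++ y :: (u2 ++ y2 :: ys2)).drop (u.length + 1) = u2 ++ y2 :: ys2 := by
          simp [List.drop_length_add_append (l₁ := u) (l₂ := y :: (u2 ++ y2 :: ys2)) 1]
        have hsub : u.length + 1 + u2.length - (u.length + 1) = u2.length := by omega
        rw [hdrop, hsub, List.take_left]
      have hPost : PySem.List.slice (u ++ y :: (u2 ++ y2 :: ys2)) (some d1) none
          = y2 :: ys2 := by
        rw [hd1', PySem.List.slice_from_natCast]
        have hassoc : u ++ y :: (u2 ++ y2 :: ys2) = (u ++ y :: u2) ++ y2 :: ys2 := by simp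
        rw [hassoc]
        have hlen : (u ++ y :: u2).length = u.length + 1 + u2.length := by simp; omega
        rw [← hlen, List.drop_left]
      rw [hMid, hPost]
      simp
  
-- ===== VERDICT (by name: the statement is the Claim_ definition above) =====
theorem clean_render_spec : Claim_equal_clean_render := by
  intro content _ _
  unfold Spec_clean_render clean_render clean_render_alt
  cases h0 : PySem.List.pyGet? (PySem.Str.splitlines content) 0 with
  | none => simp only [h0]
  | some l0 =>
    simp only [h0, pvDelims_eq]
    rw [pvCore]
    cases h1 : pvDelims (if l0 = "" then PySem.List.slice (PySem.Str.splitlines content) (some 1) none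
        else PySem.Str.splitlines content) 0 with
    | nil => simp only [h1]
    | cons d0 rest => simp only []
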